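-- pv_equiv track=rewrite | github.com/AlgorithmEngineerSHY/practice | syq.py | paint_tree_of_string
-- ===== SOURCE A (Python) =====
-- import math
--
-- def paint_tree_of_string(n_leaves):
--     '''
--
--     :param n_leaves: num of leaves.
--     :return: String
--     '''
--
--     len_tree = math.log2(n_leaves)
--     res = ['x'*n_leaves]
--     for i in range(int(len_tree)):
--         mark = left = right = 0
--         helper = set()
--         for j, k in enumerate(res[-1]):
--             if k == 'x':
--                 mark += 1
--                 if mark == 1:
--                     left = j
--                 if mark == 2:
--                     mark = 0
--                     right = j
--                     mid = round((left + right + 1) / 2)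
--                     helper.add(mid)
--         tmp_re = ['-x'[i in helper] for i in range(n_leaves)]
--         tmp_re = ''.join(tmp_re)
--         res.append(tmp_re)
--     res = '\n'.join(reversed(res))
--     return res
-- ===== SOURCE B (Python) =====
-- def paint_tree_of_string(n_leaves):
--     # track the 'x' positions per level instead of scanning full-width strings
--     levels = [list(range(n_leaves))]
--     for _ in range(n_leaves.bit_length() - 1):
--         it = iter(levels[-1])
--         levels.append([round((a + b + 1) / 2) for a, b in zip(it, it)])
--     lines = []
--     for ps in reversed(levels):
--         marks = set(ps)
--         lines.append(''.join('x' if i in marks else '-' for i in range(n_leaves)))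
--     return '\n'.join(lines)
-- ===== Notes on version B (the rewrite author's own statement) =====
-- stated objective: alternative
-- what changed: B keeps each level as a list of 'x' positions and pairs consecutive positions directly (zip of one iterator with itself, levels counted by bit_length), instead of A's re-scan of the previous full-width string with a mark/left/right state machine and a helper set; rendering to '-'/'x' lines happens once at the end.
-- outside the precondition, e.g. on paint_tree_of_string(0): A raises ValueError, B returns ''; on paint_tree_of_string(-3): A raises ValueError, B returns '\n'
import Mathlib
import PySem

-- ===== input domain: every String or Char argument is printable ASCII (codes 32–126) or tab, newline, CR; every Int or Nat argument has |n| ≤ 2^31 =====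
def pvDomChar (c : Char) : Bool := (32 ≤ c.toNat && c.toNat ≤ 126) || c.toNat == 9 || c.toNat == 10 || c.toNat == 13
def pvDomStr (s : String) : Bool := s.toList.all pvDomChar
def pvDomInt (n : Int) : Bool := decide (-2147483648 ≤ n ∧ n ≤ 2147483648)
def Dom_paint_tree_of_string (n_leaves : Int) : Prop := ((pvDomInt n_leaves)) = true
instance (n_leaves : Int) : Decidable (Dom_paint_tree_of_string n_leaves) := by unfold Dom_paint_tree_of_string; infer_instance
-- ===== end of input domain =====

-- B keeps per-level 'x' POSITION lists and pairs them two-at-a-time instead of re-scanning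
-- full-width strings character by character (same output, different data structure).

-- round(k / 2) in Python (half-to-even); exact here since the dividend is a half-integer
-- exactly representable as a double (|k| ≤ 2^33 < 2^53). Used by both ports (both sources
-- contain the same expression round((left + right + 1) / 2)).
def pvRoundHalf (k : Int) : Int :=
  if PySem.Int.mod k 2 = 0 then PySem.Int.floordiv k 2
  else if PySem.Int.mod (PySem.Int.floordiv k 2) 2 = 0 then PySem.Int.floordiv k 2
  else PySem.Int.floordiv k 2 + 1

-- ===== PORT A =====
-- body of A's inner `for j, k in enumerate(res[-1])` loop
def pvScanStep (st : Int × Int × Int × PySem.Set Int) (jk : Int × Char) :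
    Int × Int × Int × PySem.Set Int :=
  let (mark, left, right, helper) := st
  let (j, k) := jk
  if k = 'x' then
    let mark := mark + 1
    let left := if mark = 1 then j else left
    if mark = 2 then (0, left, j, PySem.Set.add helper (pvRoundHalf (left + j + 1)))
    else (mark, left, right, helper)
  else (mark, left, right, helper)

def paint_tree_of_string (n_leaves : Int) : String :=
  -- int(math.log2(n_leaves)) ported as Nat.log2: exact for 1 ≤ n_leaves ≤ 2^31
  -- (for n_leaves ≤ 0 Python's math.log2 raises ValueError — excluded by Pre_)
  let len_tree : Nat := Nat.log2 n_leaves.toNat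
  let res : List (List Char) := [List.replicate n_leaves.toNat 'x']   -- 'x' * n_leaves
  let res := (List.range len_tree).foldl (fun res _i =>
    let st := (PySem.List.enumerate (res.getLastD []) 0).foldl pvScanStep
      (0, 0, 0, (PySem.Set.empty : PySem.Set Int))
    let helper := st.2.2.2
    let tmp_re := (PySem.List.pyRange 0 n_leaves 1).map
      (fun i => if PySem.Set.contains helper i then 'x' else '-')   -- '-x'[i in helper]
    res ++ [tmp_re]) res
  String.ofList (PySem.Chars.join ['\n'] res.reverse)

-- ===== PORT B =====
-- [round((a + b + 1) / 2) for a, b in zip(it, it)] : consecutive pairs, leftover dropped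
def pvMids : List Int → List Int
  | [] => []
  | [_] => []
  | a :: b :: t => pvRoundHalf (a + b + 1) :: pvMids t

-- render one level's position list into the '-'/'x' line of width n
def pvRender (n : Int) (ps : List Int) : List Char :=
  let marks := PySem.Set.ofList ps
  (PySem.List.pyRange 0 n 1).map (fun i => if PySem.Set.contains marks i then 'x' else '-')

def paint_tree_of_string_alt (n_leaves : Int) : String :=
  let levels : List (List Int) := [PySem.List.pyRange 0 n_leaves 1]
  let levels := (List.range (PySem.Int.bitLength n_leaves - 1)).foldl
    (fun levels _i => levels ++ [pvMids (levels.getLastD [])]) levels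
  String.ofList (PySem.Chars.join ['\n'] (levels.reverse.map (pvRender n_leaves)))

-- ===== PRECONDITION & SPEC =====
-- Pre_ excludes exactly n_leaves ≤ 0, where A raises ValueError (math.log2 of a non-positive number).
def Pre_paint_tree_of_string (n_leaves : Int) : Prop := 1 ≤ n_leaves
instance (n_leaves : Int) : Decidable (Pre_paint_tree_of_string n_leaves) := by
  unfold Pre_paint_tree_of_string; infer_instance
def pvWitness_paint_tree_of_string : Int := 8

def Spec_paint_tree_of_string (n_leaves : Int) (out : String) : Prop := out = paint_tree_of_string_alt n_leaves
instance (n_leaves : Int) (out : String) : Decidable (Spec_paint_tree_of_string n_leaves out) := by unfold Spec_paint_tree_of_string; infer_instance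

-- ===== CLAIM (what is proved, stated in full; the proofs are below) =====
def Claim_equal_paint_tree_of_string : Prop := ∀ (n_leaves : Int), Dom_paint_tree_of_string n_leaves → Pre_paint_tree_of_string n_leaves → Spec_paint_tree_of_string n_leaves (paint_tree_of_string n_leaves)

-- ===== LEMMAS AND PROOFS =====

-- invariant: a level's position list is strictly increasing with entries in [0, n)
def pvGood (n : Int) (ps : List Int) : Prop :=
  ps.Pairwise (· < ·) ∧ ∀ p ∈ ps, 0 ≤ p ∧ p < n

-- the 'x'-branch of pvScanStep, as a step over the x-positions alone
def pvPairStep (st : Int × Int × Int × PySem.Set Int) (j : Int) :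
    Int × Int × Int × PySem.Set Int :=
  let (mark, left, right, helper) := st
  let mark := mark + 1
  let left := if mark = 1 then j else left
  if mark = 2 then (0, left, j, PySem.Set.add helper (pvRoundHalf (left + j + 1)))
  else (mark, left, right, helper)

theorem scan_eq_pair (l : List (Int × Char)) (st : Int × Int × Int × PySem.Set Int) :
    l.foldl pvScanStep st
      = ((l.filter (fun p => p.2 = 'x')).map Prod.fst).foldl pvPairStep st := by
  induction l generalizing st with
  | nil => rfl
  | cons p t ih =>
    obtain ⟨j, k⟩ := p
    by_cases hk : k = 'x' <;>
      simp [hk, pvScanStep, pvPairStep, ih]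

theorem pair_helper (ps : List Int) (l r : Int) (h : PySem.Set Int) :
    (ps.foldl pvPairStep (0, l, r, h)).2.2.2 = (pvMids ps).foldl PySem.Set.add h := by
  induction ps using pvMids.induct generalizing l r h with
  | case1 => rfl
  | case2 a => simp [pvMids, pvPairStep]
  | case3 a b t ih => simpa [pvPairStep, pvMids] using ih a b _

theorem mem_foldl_add {x : Int} (ms : List Int) (h : PySem.Set Int) :
    x ∈ ms.foldl PySem.Set.add h ↔ x ∈ h ∨ x ∈ ms := by
  induction ms generalizing h with
  | nil => simp
  | cons m t ih => simp [ih, PySem.Set.mem_add]; tauto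

theorem mid_bounds {a b : Int} (hab : a < b) :
    a < pvRoundHalf (a + b + 1) ∧ pvRoundHalf (a + b + 1) ≤ b := by
  unfold pvRoundHalf
  simp only [PySem.Int.floordiv_eq_ediv_of_pos (by norm_num : (0:Int) < 2),
    PySem.Int.mod_eq_emod_of_pos (by norm_num : (0:Int) < 2)]
  split_ifs <;> omega

theorem pvMids_between (ps : List Int) (hs : ps.Pairwise (· < ·)) :
    ∀ m ∈ pvMids ps, ∃ a ∈ ps, ∃ b ∈ ps, a < m ∧ m ≤ b := by
  induction ps using pvMids.induct with
  | case1 => simp [pvMids]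
  | case2 a => simp [pvMids]
  | case3 a b t ih =>
    rw [List.pairwise_cons] at hs
    obtain ⟨hab, hs'⟩ := hs
    have hst : t.Pairwise (· < ·) := (List.pairwise_cons.mp hs').2
    intro m hm
    rcases List.mem_cons.mp hm with h | h
    · obtain ⟨h1, h2⟩ := mid_bounds (hab b (by simp))
      exact ⟨a, by simp, b, by simp, h ▸ h1, h ▸ h2⟩
    · obtain ⟨a', ha', b', hb', h1, h2⟩ := ih hst m h
      exact ⟨a', by simp [ha'], b', by simp [hb'], h1, h2⟩

theorem pvMids_good (n : Int) (ps : List Int) (hg : pvGood n ps) :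
    pvGood n (pvMids ps) := by
  obtain ⟨hs, hb⟩ := hg
  constructor
  · -- pairwise
    clear hb
    induction ps using pvMids.induct with
    | case1 => simp [pvMids]
    | case2 a => simp [pvMids]
    | case3 a b t ih =>
      rw [List.pairwise_cons] at hs
      obtain ⟨hab, hs'⟩ := hs
      rw [List.pairwise_cons] at hs'
      obtain ⟨hbt, hst⟩ := hs'
      rw [pvMids, List.pairwise_cons]
      refine ⟨fun m hm => ?_, ih hst⟩
      obtain ⟨a', ha', _, _, h1, _⟩ := pvMids_between t hst m hm
      have : b < a' := hbt a' ha'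
      have := (mid_bounds (hab b (by simp))).2
      omega
  · intro m hm
    obtain ⟨a', ha', b', hb', h1, h2⟩ := pvMids_between ps hs m hm
    obtain ⟨h3, _⟩ := hb a' ha'
    obtain ⟨_, h4⟩ := hb b' hb'
    omega

theorem filter_mem_of_sorted (l ps : List Int) (hl : l.Pairwise (· < ·))
    (hps : ps.Pairwise (· < ·)) (hsub : ∀ p ∈ ps, p ∈ l) :
    l.filter (fun x => decide (x ∈ ps)) = ps := by
  have hnd : l.Nodup := hl.imp ne_of_lt
  have hndp : ps.Nodup := hps.imp ne_of_lt
  have hperm : (l.filter (fun x => decide (x ∈ ps))).Perm ps := by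
    rw [List.perm_ext_iff_of_nodup (hnd.filter _) hndp]
    intro x
    simp only [List.mem_filter, decide_eq_true_eq]
    exact ⟨fun h => h.2, fun h => ⟨hsub x h, h⟩⟩
  exact List.Perm.eq_of_pairwise
    (fun a b _ _ h1 h2 => absurd h1 (lt_asymm h2)) (hl.filter _) hps hperm

-- character read from a rendered line
theorem pyGetD_render (n : Int) (ps : List Int) {j : Int} (h0 : 0 ≤ j) (hn : j < n) :
    PySem.List.pyGetD (pvRender n ps) j '-'
      = if PySem.Set.contains (PySem.Set.ofList ps) j then 'x' else '-' := by
  unfold pvRender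
  exact PySem.List.pyGetD_map_pyRange_of_nonneg _ n j '-' h0 hn

theorem len_render (n : Int) (hn : 0 ≤ n) (ps : List Int) :
    PySem.List.len (pvRender n ps) = n := by
  simp [pvRender, PySem.List.len, PySem.List.length_pyRange_one]
  omega

-- the x-positions of a rendered level are exactly that level's position list
theorem xpos_render (n : Int) (hn : 1 ≤ n) (ps : List Int) (hg : pvGood n ps) :
    (((PySem.List.enumerate (pvRender n ps) 0).filter (fun p => p.2 = 'x')).map Prod.fst)
      = ps := by
  obtain ⟨hs, hb⟩ := hg
  rw [PySem.List.enumerate_eq_map_pyRange (pvRender n ps) '-',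
    len_render n (by omega) ps, List.filter_map, List.map_map]
  have h1 : ∀ x ∈ PySem.List.pyRange 0 n,
      ((fun p => decide (p.2 = 'x')) ∘ fun j => (j, PySem.List.pyGetD (pvRender n ps) j '-')) x
        = (fun x => decide (x ∈ ps)) x := by
    intro x hx
    obtain ⟨hx0, hxn⟩ := PySem.List.mem_pyRange_one.mp hx
    simp only [Function.comp_apply, pyGetD_render n ps hx0 hxn,
      PySem.Set.contains_eq_decide, PySem.Set.mem_ofList]
    by_cases hmem : x ∈ ps <;> simp [hmem]
  rw [List.filter_congr h1]
  have h2 : (Prod.fst ∘ fun j => (j, PySem.List.pyGetD (pvRender n ps) j '-'))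
      = id := rfl
  rw [h2, List.map_id]
  exact filter_mem_of_sorted _ ps (PySem.List.pairwise_lt_pyRange_one 0 n) hs
    (fun p hp => PySem.List.mem_pyRange_one.mpr ⟨(hb p hp).1, (hb p hp).2⟩)

-- the string scan of a rendered level produces the render of its pair-midpoints
theorem level_step (n : Int) (hn : 1 ≤ n) (ps : List Int) (hg : pvGood n ps) :
    ((PySem.List.pyRange 0 n).map (fun i =>
      if PySem.Set.contains
        (((PySem.List.enumerate (pvRender n ps)).foldl pvScanStep
          (0, 0, 0, (PySem.Set.empty : PySem.Set Int))).2.2.2) i then 'x' else '-'))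
      = pvRender n (pvMids ps) := by
  rw [scan_eq_pair, xpos_render n hn ps hg, pair_helper]
  unfold pvRender
  apply List.map_congr_left
  intro i _
  have hmem : i ∈ (pvMids ps).foldl PySem.Set.add (PySem.Set.empty : PySem.Set Int)
      ↔ i ∈ PySem.Set.ofList (pvMids ps) := by
    rw [mem_foldl_add, PySem.Set.mem_ofList]
    simp [PySem.Set.empty]
  simp only [PySem.Set.contains_eq_decide]
  rw [decide_eq_decide.mpr hmem]

theorem log2_eq_bitLength (n : Int) (hn : 1 ≤ n) :
    Nat.log2 n.toNat = PySem.Int.bitLength n - 1 := by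
  have habs : n.natAbs = n.toNat := by omega
  have h1 : n.toNat < 2 ^ PySem.Int.bitLength n := by
    have := PySem.Int.lt_two_pow_bitLength n; omega
  have h2 : 2 ^ (PySem.Int.bitLength n - 1) ≤ n.toNat := by
    have := PySem.Int.two_pow_bitLength_le n (by omega); omega
  have hne : n.toNat ≠ 0 := by omega
  have hB1 : 1 ≤ PySem.Int.bitLength n := by
    by_contra h
    have hb0 : PySem.Int.bitLength n = 0 := by omega
    rw [hb0] at h1; simp at h1; omega
  apply Nat.le_antisymm
  · have := (Nat.log2_lt hne).mpr h1; omega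
  · exact (Nat.le_log2 hne).mpr h2

-- the full bottom level renders as 'x' * n
theorem render_full (n : Int) (hn : 0 ≤ n) :
    pvRender n (PySem.List.pyRange 0 n) = List.replicate n.toNat 'x' := by
  unfold pvRender
  have h1 : ∀ i ∈ PySem.List.pyRange 0 n,
      (if PySem.Set.contains (PySem.Set.ofList (PySem.List.pyRange 0 n)) i then 'x' else '-')
        = Function.const Int 'x' i := by
    intro i hi
    simp [PySem.Set.mem_ofList, hi]
  rw [List.map_congr_left h1, List.map_const, PySem.List.length_pyRange_one]
  congr 1; omega

-- A's level loop on rendered lines tracks B's level loop on position lists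
theorem loop_eq (n : Int) (hn : 1 ≤ n) (L : Nat) (levels : List (List Int))
    (hne : levels ≠ []) (hg : pvGood n (levels.getLastD [])) :
    ((List.range L).foldl (fun res _i =>
        let st := (PySem.List.enumerate (res.getLastD [])).foldl pvScanStep
          (0, 0, 0, (PySem.Set.empty : PySem.Set Int))
        let helper := st.2.2.2
        let tmp_re := (PySem.List.pyRange 0 n).map
          (fun i => if PySem.Set.contains helper i then 'x' else '-')
        res ++ [tmp_re]) (levels.map (pvRender n)))
      = ((List.range L).foldl (fun lv _i => lv ++ [pvMids (lv.getLastD [])]) levels).map (pvRender n)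
    ∧ ((List.range L).foldl (fun lv _i => lv ++ [pvMids (lv.getLastD [])]) levels) ≠ []
    ∧ pvGood n (((List.range L).foldl (fun lv _i => lv ++ [pvMids (lv.getLastD [])]) levels).getLastD []) := by
  induction L with
  | zero => exact ⟨rfl, hne, hg⟩
  | succ L ih =>
    obtain ⟨heq, hne', hg'⟩ := ih
    set lv' := (List.range L).foldl (fun lv _i => lv ++ [pvMids (lv.getLastD [])]) levels with hlv
    rw [List.range_succ, List.foldl_append, List.foldl_append]
    simp only [List.foldl_cons, List.foldl_nil, heq]
    have hlast : (lv'.map (pvRender n)).getLastD [] = pvRender n (lv'.getLastD []) := by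
      rw [List.getLastD_eq_getLast?, List.getLastD_eq_getLast?, List.getLast?_map]
      cases hy : lv'.getLast? with
      | none => exact absurd (List.getLast?_eq_none_iff.mp hy) hne'
      | some z => simp
    refine ⟨?_, by simp, ?_⟩
    · rw [hlast, level_step n hn _ hg', ← hlv]
      simp
    · rw [List.getLastD_concat]
      exact pvMids_good n _ hg'

-- ===== VERDICT (by name: the statement is the Claim_ definition above) =====
theorem paint_tree_of_string_spec : Claim_equal_paint_tree_of_string := by
  intro n hdom hpre
  unfold Pre_paint_tree_of_string at hpre
  unfold Spec_paint_tree_of_string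
  simp only [paint_tree_of_string, paint_tree_of_string_alt]
  have hg0 : pvGood n ((([PySem.List.pyRange 0 n] : List (List Int))).getLastD []) := by
    refine ⟨PySem.List.pairwise_lt_pyRange_one 0 n, fun p hp => ?_⟩
    have := PySem.List.mem_pyRange_one.mp hp
    exact ⟨this.1, this.2⟩
  obtain ⟨heq, -, -⟩ := loop_eq n hpre (PySem.Int.bitLength n - 1)
    [PySem.List.pyRange 0 n] (by simp) hg0
  rw [log2_eq_bitLength n hpre]
  have hinit : ([List.replicate n.toNat 'x'] : List (List Char))
      = ([PySem.List.pyRange 0 n] : List (List Int)).map (pvRender n) := by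
    simp [render_full n (by omega)]
  rw [hinit, heq, List.map_reverse]
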